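-- pv_equiv track=rewrite | github.com/tempifyOS/steganography-project | stego.py | find_runs_and_convert_to_output_string
-- ===== SOURCE A (Python) =====
-- def find_runs_and_convert_to_output_string(s: str, M: int) -> str:
--     """
--     Finds all non-overlapping runs of at least length M in the binary string s.
--     If the run length is even, then append a '0' to the output.
--     If the run length is odd, then append a '1' to the output.
--     """
--     if M <= 0:
--         raise ValueError("Minimum length M must be greater than 0.")
--
--     i = 0
--     n = len(s)
--     output_bits = []
--
--     while i < n:
--         current_bit = s[i]
--         start = i
--         while i < n and s[i] == current_bit:
--             i += 1
--         run_len = i - start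
--         if run_len >= M:
--             output_bits.append('1' if run_len % 2 else '0')
--
--     return ''.join(output_bits)
-- ===== SOURCE B (Python) =====
-- def find_runs_and_convert_to_output_string(s: str, M: int) -> str:
--     """Staged boundary-detection pipeline: first list every run-start index by
--     comparing each character with its predecessor, then take differences of
--     consecutive boundaries to get run lengths, then filter/map to parity bits.
--     No run is ever 'extended': lengths come from subtracting boundary positions."""
--     if M <= 0:
--         raise ValueError("Minimum length M must be greater than 0.")
--     n = len(s)
--     cuts = [i for i in range(n) if i == 0 or s[i] != s[i - 1]] + [n]
--     lengths = [b - a for a, b in zip(cuts, cuts[1:])]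
--     return ''.join('1' if L % 2 else '0' for L in lengths if L >= M)
-- ===== Notes on version B (the rewrite author's own statement) =====
-- stated objective: alternative
-- what changed: Replaces A's imperative run-extension (nested while loops advancing an index through each run) with a staged declarative pipeline: list all run-start boundaries by comparing s[i] to s[i-1] over range(n), take differences of consecutive boundaries via zip to get run lengths, then filter/map to parity bits; Pre_ excludes M <= 0, where A raises ValueError.
-- outside the precondition, e.g. on find_runs_and_convert_to_output_string('aaa', 0): A raises ValueError, B raises ValueError
import Mathlib
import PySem

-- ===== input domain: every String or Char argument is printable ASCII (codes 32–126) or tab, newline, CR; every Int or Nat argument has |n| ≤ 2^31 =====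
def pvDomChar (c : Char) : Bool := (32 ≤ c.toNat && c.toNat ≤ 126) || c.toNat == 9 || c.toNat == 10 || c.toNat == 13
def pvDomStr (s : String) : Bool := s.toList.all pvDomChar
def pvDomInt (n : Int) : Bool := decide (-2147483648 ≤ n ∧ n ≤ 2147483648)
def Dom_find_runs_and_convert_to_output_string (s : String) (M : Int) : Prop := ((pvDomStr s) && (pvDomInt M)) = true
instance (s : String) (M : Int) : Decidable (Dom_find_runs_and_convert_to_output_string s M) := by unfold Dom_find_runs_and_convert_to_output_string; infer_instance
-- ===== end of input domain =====

-- B replaces A's imperative run-extension loops by a staged pipeline: filter the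
-- run-start boundary indices over range(n), difference consecutive boundaries via
-- zip to get run lengths, then filter/map to parity bits; alternative decomposition, same O(n) cost.


-- ===== PORT A =====
-- inner loop: `while i < n and s[i] == current_bit: i += 1`
-- (fuel-based structural recursion; fuel `cs.length - i` bounds the iterations, a pure totalization device)
def pvAdvA (cs : List Char) (c : Char) : Nat → Nat → Nat
  | 0, i => i
  | fuel + 1, i => if i < cs.length ∧ cs.getD i ' ' = c then pvAdvA cs c fuel (i + 1) else i

-- outer loop: `while i < n: …` accumulating output_bits (fuel `cs.length` bounds the number of runs)
def pvOuterA (cs : List Char) (M : Int) : Nat → Nat → List Char → List Char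
  | 0, _, acc => acc
  | fuel + 1, i, acc =>
    if i < cs.length then
      let c := cs.getD i ' '
      let j := pvAdvA cs c (cs.length - i) i
      pvOuterA cs M fuel j
        (if (((j - i : Nat) : Int) ≥ M) then
          acc ++ [if (j - i) % 2 = 1 then '1' else '0'] else acc)
    else acc

def find_runs_and_convert_to_output_string (s : String) (M : Int) : String :=
  String.mk (pvOuterA s.toList M s.toList.length 0 [])

-- ===== PORT B =====
-- staged pipeline, step for step from Source B:
--   cuts    = [i for i in range(n) if i == 0 or s[i] != s[i-1]] + [n]
--   lengths = [b - a for a, b in zip(cuts, cuts[1:])]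
--   join of ('1' if L % 2 else '0' for L in lengths if L >= M)
def find_runs_and_convert_to_output_string_alt (s : String) (M : Int) : String :=
  let cs := s.toList
  let n : Int := (cs.length : Int)
  let cuts : List Int :=
    ((PySem.List.pyRange 0 n 1).filter
      (fun i => i == 0 || !(PySem.List.pyGet? cs i == PySem.List.pyGet? cs (i - 1)))) ++ [n]
  let lengths : List Int := (cuts.zip (cuts.drop 1)).map (fun p => p.2 - p.1)
  String.mk ((lengths.filter (fun L => M ≤ L)).map
    (fun L => if PySem.Int.mod L 2 ≠ 0 then '1' else '0'))

-- ===== PRECONDITION & SPEC =====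
-- Pre_ excludes exactly M ≤ 0, where the Python A raises ValueError.
def Pre_find_runs_and_convert_to_output_string (s : String) (M : Int) : Prop := 0 < M
instance (s : String) (M : Int) : Decidable (Pre_find_runs_and_convert_to_output_string s M) := by unfold Pre_find_runs_and_convert_to_output_string; infer_instance
def pvWitness_find_runs_and_convert_to_output_string : String × Int := ("aaabba", 2)

def Spec_find_runs_and_convert_to_output_string (s : String) (M : Int) (out : String) : Prop := out = find_runs_and_convert_to_output_string_alt s M
instance (s : String) (M : Int) (out : String) : Decidable (Spec_find_runs_and_convert_to_output_string s M out) := by unfold Spec_find_runs_and_convert_to_output_string; infer_instance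

-- ===== CLAIM (what is proved, stated in full; the proofs are below) =====
def Claim_equal_find_runs_and_convert_to_output_string : Prop := ∀ (s : String) (M : Int), Dom_find_runs_and_convert_to_output_string s M → Pre_find_runs_and_convert_to_output_string s M → Spec_find_runs_and_convert_to_output_string s M (find_runs_and_convert_to_output_string s M)

-- ===== LEMMAS AND PROOFS =====

-- Run lengths of `c^r ++ rest`, the current run having length r so far.
def pvRunsFrom (c : Char) (r : Nat) : List Char → List Nat
  | [] => [r]
  | x :: xs => if x = c then pvRunsFrom c (r + 1) xs else r :: pvRunsFrom x 1 xs

def pvTailRuns : List Char → List Nat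
  | [] => []
  | x :: xs => pvRunsFrom x 1 xs

-- Parity bits emitted for a list of run lengths.
def pvEmit (M : Int) : List Nat → List Char
  | [] => []
  | k :: ks => (if ((k : Nat) : Int) ≥ M then [if k % 2 = 1 then '1' else '0'] else []) ++ pvEmit M ks

theorem pvRunsFrom_eq (rest : List Char) : ∀ (c : Char) (r : Nat),
    pvRunsFrom c r rest =
      (r + (rest.takeWhile (· = c)).length) :: pvTailRuns (rest.dropWhile (· = c)) := by
  induction rest with
  | nil => intro c r; simp [pvRunsFrom, pvTailRuns]
  | cons x xs ih =>
    intro c r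
    by_cases hx : x = c
    · simp [pvRunsFrom, List.takeWhile, List.dropWhile, hx, ih c (r + 1)]
      omega
    · simp [pvRunsFrom, List.takeWhile, List.dropWhile, hx, pvTailRuns]

theorem pv_drop_takeWhile (p : Char → Bool) (l : List Char) :
    l.drop (l.takeWhile p).length = l.dropWhile p := by
  induction l with
  | nil => rfl
  | cons x xs ih =>
    by_cases hx : p x
    · simpa [List.takeWhile, List.dropWhile, hx] using ih
    · simp [List.takeWhile, List.dropWhile, hx]

theorem pvAdvA_eq (cs : List Char) (c : Char) : ∀ (fuel i : Nat), cs.length - i ≤ fuel →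
    pvAdvA cs c fuel i = i + ((cs.drop i).takeWhile (· = c)).length := by
  intro fuel
  induction fuel with
  | zero =>
    intro i hf
    rw [List.drop_eq_nil_of_le (by omega)]
    simp [pvAdvA]
  | succ fuel ih =>
    intro i hf
    by_cases h : i < cs.length ∧ cs.getD i ' ' = c
    · obtain ⟨h1, h2⟩ := h
      have hg : cs[i] = c := by rwa [List.getD_eq_getElem cs ' ' h1] at h2
      rw [pvAdvA, if_pos ⟨h1, h2⟩, ih (i + 1) (by omega), List.drop_eq_getElem_cons h1]
      simp [List.takeWhile, hg]
      omega
    · rw [pvAdvA, if_neg h]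
      by_cases h1 : i < cs.length
      · have h2 : cs.getD i ' ' ≠ c := fun hc => h ⟨h1, hc⟩
        have hg : cs[i] ≠ c := by rwa [List.getD_eq_getElem cs ' ' h1] at h2
        rw [List.drop_eq_getElem_cons h1]
        simp [List.takeWhile, hg]
      · rw [List.drop_eq_nil_of_le (by omega)]
        simp

theorem pvOuterA_eq (cs : List Char) (M : Int) : ∀ (fuel i : Nat) (acc : List Char),
    cs.length - i ≤ fuel → pvOuterA cs M fuel i acc = acc ++ pvEmit M (pvTailRuns (cs.drop i)) := by
  intro fuel
  induction fuel with
  | zero =>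
    intro i acc hf
    rw [List.drop_eq_nil_of_le (by omega)]
    simp [pvOuterA, pvTailRuns, pvEmit]
  | succ fuel ih =>
    intro i acc hf
    by_cases h : i < cs.length
    · rw [pvOuterA, if_pos h]
      set c := cs.getD i ' ' with hc
      set j := pvAdvA cs c (cs.length - i) i with hj
      have hg : cs[i] = c := (List.getD_eq_getElem cs ' ' h).symm
      have hdropi : cs.drop i = c :: cs.drop (i + 1) := by
        rw [List.drop_eq_getElem_cons h, hg]
      have hadv : j = i + 1 + ((cs.drop (i + 1)).takeWhile (· = c)).length := by
        rw [hj, pvAdvA_eq cs c (cs.length - i) i (by omega), hdropi]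
        simp [List.takeWhile]
        omega
      set tw := ((cs.drop (i + 1)).takeWhile (· = c)).length with htw
      have hji : i < j := by omega
      have hdropj : cs.drop j = (cs.drop (i + 1)).dropWhile (· = c) := by
        rw [hadv, ← pv_drop_takeWhile (· = c) (cs.drop (i + 1)), ← List.drop_drop]
      rw [ih j _ (by omega), hdropi]
      show _ = acc ++ pvEmit M (pvRunsFrom c 1 (cs.drop (i + 1)))
      rw [pvRunsFrom_eq, ← hdropj, ← htw]
      have h1tw : 1 + tw = j - i := by omega
      simp only [pvEmit, h1tw, ← hj]
      split
      · simp
      · simp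
    · rw [pvOuterA, if_neg h, List.drop_eq_nil_of_le (by omega)]
      simp [pvTailRuns, pvEmit]

-- B side: the run-start boundary indices of cs at positions ≥ j, the character
-- at position j-1 being prev.
def pvCutsZ (prev : Char) : List Char → Nat → List Int
  | [], _ => []
  | x :: t, j => if x = prev then pvCutsZ x t (j + 1) else (j : Int) :: pvCutsZ x t (j + 1)

-- successive differences, as the port's zip/map computes them
def pvDiffs (v : List Int) : List Int := (v.zip (v.drop 1)).map (fun p => p.2 - p.1)

theorem pvDiffs_cons (a b : Int) (w : List Int) :
    pvDiffs (a :: b :: w) = (b - a) :: pvDiffs (b :: w) := by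
  simp [pvDiffs]

-- the filtered range computes exactly the boundary list
theorem pvFilter_eq_cuts (cs : List Char) : ∀ (k j : Nat), cs.length - j ≤ k → 1 ≤ j → j ≤ cs.length →
    (PySem.List.pyRange (j : Int) (cs.length : Int) 1).filter
        (fun i => i == 0 || !(PySem.List.pyGet? cs i == PySem.List.pyGet? cs (i - 1)))
      = pvCutsZ (cs.getD (j - 1) ' ') (cs.drop j) j := by
  intro k
  induction k with
  | zero =>
    intro j hk h1 h2
    have hj : j = cs.length := by omega
    subst hj
    rw [PySem.List.pyRange_one_eq_nil le_rfl, List.drop_length]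
    simp [pvCutsZ]
  | succ k ih =>
    intro j hk h1 h2
    by_cases hlt : j < cs.length
    · have hjlt : (j : Int) < (cs.length : Int) := by exact_mod_cast hlt
      rw [PySem.List.pyRange_one_cons hjlt]
      simp only [List.filter_cons]
      have hget : PySem.List.pyGet? cs (j : Int) = some cs[j] := by
        rw [PySem.List.pyGet?_natCast]
        exact List.getElem?_eq_getElem hlt
      have hget' : PySem.List.pyGet? cs ((j : Int) - 1) = some cs[j - 1] := by
        have e : ((j : Int) - 1) = ((j - 1 : Nat) : Int) := by omega
        rw [e, PySem.List.pyGet?_natCast]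
        exact List.getElem?_eq_getElem (by omega)
      have hj0 : ((j : Int) == 0) = false := by simp; omega
      have hcast : (j : Int) + 1 = ((j + 1 : Nat) : Int) := by push_cast; ring
      rw [hget, hget', hj0, hcast, ih (j + 1) (by omega) (by omega) (by omega)]
      have hprev : cs.getD (j + 1 - 1) ' ' = cs[j] := List.getD_eq_getElem cs ' ' (by omega)
      have hgd : cs.getD (j - 1) ' ' = cs[j - 1] := List.getD_eq_getElem cs ' ' (by omega)
      rw [hprev, hgd, List.drop_eq_getElem_cons hlt]
      by_cases hx : cs[j] = cs[j - 1]
      · simp [pvCutsZ, hx]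
      · simp [pvCutsZ, hx]
    · have hj : j = cs.length := by omega
      subst hj
      rw [PySem.List.pyRange_one_eq_nil le_rfl, List.drop_length]
      simp [pvCutsZ]

-- differencing the boundary list recovers the run lengths
theorem pvDiffs_cuts (t : List Char) : ∀ (prev : Char) (j r : Nat) (a : Int),
    a = (j : Int) - (r : Int) → 1 ≤ r → r ≤ j →
    pvDiffs (a :: (pvCutsZ prev t j ++ [(j : Int) + (t.length : Int)]))
      = (pvRunsFrom prev r t).map (fun (x : Nat) => (x : Int)) := by
  induction t with
  | nil =>
    intro prev j r a ha h1 hr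
    simp [pvCutsZ, pvRunsFrom, pvDiffs]
    omega
  | cons x t ih =>
    intro prev j r a ha h1 hr
    have e2 : (j : Int) + (((x :: t).length : Nat) : Int) = ((j + 1 : Nat) : Int) + (t.length : Int) := by
      push_cast [List.length_cons]; ring
    by_cases hx : x = prev
    · rw [show pvCutsZ prev (x :: t) j = pvCutsZ x t (j + 1) from by simp [pvCutsZ, hx],
        show pvRunsFrom prev r (x :: t) = pvRunsFrom x (r + 1) t from by simp [pvRunsFrom, hx], e2]
      exact ih x (j + 1) (r + 1) a (by omega) (by omega) (by omega)
    · rw [show pvCutsZ prev (x :: t) j = (j : Int) :: pvCutsZ x t (j + 1) from by simp [pvCutsZ, hx],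
        show pvRunsFrom prev r (x :: t) = r :: pvRunsFrom x 1 t from by simp [pvRunsFrom, hx],
        e2, List.cons_append, pvDiffs_cons,
        show ((j : Int) - a) = (r : Int) from by omega,
        ih x (j + 1) 1 (j : Int) (by push_cast; ring) le_rfl (by omega), List.map_cons]

-- emitting parity bits from the Int lengths = pvEmit on the Nat run lengths
theorem pvEmitZ_eq (M : Int) (ks : List Nat) :
    ((ks.map (fun (x : Nat) => (x : Int))).filter (fun L => M ≤ L)).map
        (fun L => if PySem.Int.mod L 2 ≠ 0 then '1' else '0')
      = pvEmit M ks := by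
  induction ks with
  | nil => simp [pvEmit]
  | cons k ks ih =>
    have hbit : (if PySem.Int.mod (k : Int) 2 ≠ 0 then '1' else '0')
        = (if k % 2 = 1 then '1' else '0') := by
      rw [PySem.Int.mod_eq_emod_of_pos (by norm_num)]
      by_cases h2 : k % 2 = 1
      · rw [if_pos (by omega), if_pos h2]
      · rw [if_neg (by omega), if_neg h2]
    rw [List.map_cons, List.filter_cons]
    by_cases hM : M ≤ (k : Int)
    · rw [if_pos (decide_eq_true hM), List.map_cons, hbit, ih]
      simp only [pvEmit, ge_iff_le, if_pos hM, List.singleton_append]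
    · rw [if_neg (by simpa using hM), ih]
      simp only [pvEmit, ge_iff_le, if_neg hM, List.nil_append]

-- fold the port's zip/map difference expression into pvDiffs
theorem pvDiffs_def (v : List Int) :
    (v.zip (v.drop 1)).map (fun p => p.2 - p.1) = pvDiffs v := rfl

-- B's pipeline computes the parity bits of the run lengths
theorem pvAlt_eq (s : String) (M : Int) :
    find_runs_and_convert_to_output_string_alt s M = String.mk (pvEmit M (pvTailRuns s.toList)) := by
  simp only [find_runs_and_convert_to_output_string_alt]
  generalize s.toList = cs
  cases cs with
  | nil =>
    rw [PySem.List.pyRange_one_eq_nil (by simp)]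
    simp [pvTailRuns, pvEmit]
  | cons c rest =>
    refine congrArg String.mk ?_
    have hpos : (0 : Int) < (((c :: rest).length : Nat) : Int) := by push_cast [List.length_cons]; omega
    rw [PySem.List.pyRange_one_cons hpos, show (0 : Int) + 1 = 1 from by norm_num]
    simp only [List.filter_cons]
    have hc0 : ((0 : Int) == 0 ||
        !(PySem.List.pyGet? (c :: rest) 0 == PySem.List.pyGet? (c :: rest) (0 - 1))) = true := by
      simp
    rw [if_pos hc0]
    have hfil := pvFilter_eq_cuts (c :: rest) ((c :: rest).length) 1 (by omega) (by omega) (by omega)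
    simp only [Nat.cast_one, Nat.sub_self, List.getD_cons_zero, List.drop_one, List.tail_cons] at hfil
    rw [hfil, List.cons_append, pvDiffs_def,
      show ((((c :: rest).length : Nat) : Int)) = ((1 : Nat) : Int) + (rest.length : Int) from by
        push_cast [List.length_cons]; ring,
      pvDiffs_cuts rest c 1 1 0 (by omega) le_rfl le_rfl]
    exact pvEmitZ_eq M (pvRunsFrom c 1 rest)

-- ===== VERDICT (by name: the statement is the Claim_ definition above) =====
theorem find_runs_and_convert_to_output_string_spec : Claim_equal_find_runs_and_convert_to_output_string := by
  intro s M _hDom _hPre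
  show find_runs_and_convert_to_output_string s M = find_runs_and_convert_to_output_string_alt s M
  rw [pvAlt_eq]
  unfold find_runs_and_convert_to_output_string
  rw [pvOuterA_eq s.toList M s.toList.length 0 [] (by omega), List.drop_zero, List.nil_append]
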